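-- pv_equiv track=rewrite | github.com/bunkdeath/SentimentAnalysis | src/com/bunkdeath/svm/data/BuildDictionaryUni.py | build_dictionary
-- ===== SOURCE A (Python) =====
-- def build_dictionary(tweet, dict):
--     words = tweet.split(" ")
--     for word in words:
--         if word in ['USERNAME','URL','','EMAIL']:
--             continue
--         elif word in dict:
--             dict[word] += 1
--         else:
--             dict[word] = 1
--     return dict
-- ===== SOURCE B (Python) =====
-- SPECIAL = frozenset(('USERNAME', 'URL', '', 'EMAIL'))
--
-- def build_dictionary(tweet, dict):
--     # dedup+count: one pass to filter, then one update per DISTINCT word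
--     # (mutates and returns the same dict object, like the original)
--     words = [w for w in tweet.split(" ") if w not in SPECIAL]
--     for w in {u: None for u in words}:
--         dict[w] = dict.get(w, 0) + words.count(w)
--     return dict
-- ===== Notes on version B (the rewrite author's own statement) =====
-- stated objective: alternative
-- what changed: A increments the dict once per word while scanning the tweet; B first filters the split words, deduplicates them in first-occurrence order, and then writes each distinct word exactly once as dict.get(w,0) + words.count(w) (a dedup-and-count pass instead of word-by-word increments).
import Mathlib
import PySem

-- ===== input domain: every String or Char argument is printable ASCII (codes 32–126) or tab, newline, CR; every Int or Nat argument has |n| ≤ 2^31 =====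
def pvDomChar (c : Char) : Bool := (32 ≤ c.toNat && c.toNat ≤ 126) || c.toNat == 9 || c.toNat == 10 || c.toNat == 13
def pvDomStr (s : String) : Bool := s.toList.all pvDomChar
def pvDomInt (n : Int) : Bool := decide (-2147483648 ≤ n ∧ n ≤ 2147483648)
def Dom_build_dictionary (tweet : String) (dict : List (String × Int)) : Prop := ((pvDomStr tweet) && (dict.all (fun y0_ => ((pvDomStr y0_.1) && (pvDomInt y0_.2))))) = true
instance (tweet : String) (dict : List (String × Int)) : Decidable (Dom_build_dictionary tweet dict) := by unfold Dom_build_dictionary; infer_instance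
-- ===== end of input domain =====

-- B replaces A's word-by-word dict increments by a filter + dedup pass that writes each
-- distinct word once with its total count (alternative decomposition; A also mutates the
-- passed-in dict in place — the equivalence proved here is about the returned value).


-- ===== PORT A =====
def build_dictionary (tweet : String) (dict : List (String × Int)) : List (String × Int) :=
  -- sep is the literal non-empty " ", so split? is always `some`; the `getD []` default is never taken
  let words := (PySem.Str.split? tweet " ").getD []
  (words.foldl (fun d word =>
      if word ∈ ["USERNAME", "URL", "", "EMAIL"] then d
      else if d.contains word then d.insert word (d.getD word 0 + 1)
      else d.insert word 1)
    (PySem.Dict.mk dict)).items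

-- ===== PORT B =====
def pvSpecial : PySem.Set String := PySem.Set.ofList ["USERNAME", "URL", "", "EMAIL"]

def build_dictionary_alt (tweet : String) (dict : List (String × Int)) : List (String × Int) :=
  let words := ((PySem.Str.split? tweet " ").getD []).filter (fun w => !(PySem.Set.contains pvSpecial w))
  ((PySem.List.dedup words).foldl (fun d w => d.insert w (d.getD w 0 + (words.count w : Int)))
    (PySem.Dict.mk dict)).items

-- ===== PRECONDITION & SPEC =====
-- Pre_ says the association list encodes a Python dict: distinct keys (a Python dict can
-- never present duplicate keys, so this excludes no input the Python function receives).
def Pre_build_dictionary (tweet : String) (dict : List (String × Int)) : Prop :=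
  (dict.map Prod.fst).Nodup
instance (tweet : String) (dict : List (String × Int)) : Decidable (Pre_build_dictionary tweet dict) := by unfold Pre_build_dictionary; infer_instance
def pvWitness_build_dictionary : String × (List (String × Int)) := ("hi hi URL you", [("you", 2)])

def Spec_build_dictionary (tweet : String) (dict : List (String × Int)) (out : List (String × Int)) : Prop := out = build_dictionary_alt tweet dict
instance (tweet : String) (dict : List (String × Int)) (out : List (String × Int)) : Decidable (Spec_build_dictionary tweet dict out) := by unfold Spec_build_dictionary; infer_instance

-- ===== CLAIM (what is proved, stated in full; the proofs are below) =====
def Claim_equal_build_dictionary : Prop := ∀ (tweet : String) (dict : List (String × Int)), Dom_build_dictionary tweet dict → Pre_build_dictionary tweet dict → Spec_build_dictionary tweet dict (build_dictionary tweet dict)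

-- ===== LEMMAS AND PROOFS =====

-- a loop that skips the elements satisfying p is the loop over the filtered list
theorem foldl_skip_if {α β : Type} (p : α → Bool) (f : β → α → β) (l : List α) (init : β) :
    l.foldl (fun acc x => if p x then acc else f acc x) init
      = (l.filter (fun x => !p x)).foldl f init := by
  induction l generalizing init with
  | nil => rfl
  | cons x xs ih =>
      by_cases h : p x <;> simp [h, ih]

-- value of a fold over distinct keys inserting getD + f
theorem getD_foldl_insert_nodup (ks : List String) (f : String → Int)
    (d : PySem.Dict String Int) (v : String) (hnd : ks.Nodup) :
    (ks.foldl (fun d w => d.insert w (d.getD w 0 + f w)) d).getD v 0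
      = d.getD v 0 + (if v ∈ ks then f v else 0) := by
  induction ks generalizing d with
  | nil => simp
  | cons k rest ih =>
      simp only [List.foldl_cons]
      rcases List.nodup_cons.mp hnd with ⟨hk, hrest⟩
      by_cases hv : v = k
      · subst hv
        rw [ih _ hrest]
        simp [PySem.Dict.getD_insert_self, hk]
      · rw [ih _ hrest]
        rw [PySem.Dict.getD_insert_of_ne _ _ _ hv]
        simp [hv]

-- updating a set with the deduplicated list is updating it with the list
theorem set_update_dedup {α : Type} [BEq α] [LawfulBEq α] (s : PySem.Set α) (l : List α) :
    PySem.Set.update s (PySem.List.dedup l) = PySem.Set.update s l := by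
  rw [PySem.Set.update_eq_append_filter, PySem.Set.update_eq_append_filter]
  simp [PySem.Set.ofList_ofList]

theorem core_eq (l : List String) (d : PySem.Dict String Int) (hnd : d.keys.Nodup) :
    (l.foldl (fun d w => d.insert w (d.getD w 0 + 1)) d).items
      = ((PySem.List.dedup l).foldl (fun d w => d.insert w (d.getD w 0 + (l.count w : Int))) d).items := by
  have hA : (l.foldl (fun d w => d.insert w (d.getD w 0 + 1)) d).keys
      = PySem.Set.update d.keys l := PySem.Dict.keys_foldl_insert _ _ _
  have hB : ((PySem.List.dedup l).foldl (fun d w => d.insert w (d.getD w 0 + (l.count w : Int))) d).keys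
      = PySem.Set.update d.keys (PySem.List.dedup l) := PySem.Dict.keys_foldl_insert _ _ _
  have hkeys : (l.foldl (fun d w => d.insert w (d.getD w 0 + 1)) d).keys
      = ((PySem.List.dedup l).foldl (fun d w => d.insert w (d.getD w 0 + (l.count w : Int))) d).keys := by
    rw [hA, hB, set_update_dedup]
  have hndA : (l.foldl (fun d w => d.insert w (d.getD w 0 + 1)) d).keys.Nodup :=
    PySem.Dict.nodup_keys_foldl_insert _ _ _ hnd
  have hndB : ((PySem.List.dedup l).foldl (fun d w => d.insert w (d.getD w 0 + (l.count w : Int))) d).keys.Nodup :=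
    PySem.Dict.nodup_keys_foldl_insert _ _ _ hnd
  have hget : ∀ v, (l.foldl (fun d w => d.insert w (d.getD w 0 + 1)) d).getD v 0
      = ((PySem.List.dedup l).foldl (fun d w => d.insert w (d.getD w 0 + (l.count w : Int))) d).getD v 0 := by
    intro v
    rw [PySem.Dict.getD_foldl_insert_add_one,
        getD_foldl_insert_nodup _ _ _ _ (PySem.List.nodup_dedup l)]
    by_cases hv : v ∈ l
    · simp [hv]
    · simp [hv, List.count_eq_zero_of_not_mem hv]
  rw [PySem.Dict.items_eq_map_keys _ hndA 0, PySem.Dict.items_eq_map_keys _ hndB 0, hkeys]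
  exact List.map_congr_left (fun k _ => by rw [hget k])

-- ===== VERDICT (by name: the statement is the Claim_ definition above) =====
theorem build_dictionary_spec : Claim_equal_build_dictionary := by
  intro tweet dict _ hpre
  unfold Spec_build_dictionary build_dictionary build_dictionary_alt
  simp only []
  -- A's step: collapse the special-token test and the contains branch into one skip-or-insert step
  have hstep : ∀ (d : PySem.Dict String Int) (w : String),
      (if w ∈ ["USERNAME", "URL", "", "EMAIL"] then d
       else if d.contains w then d.insert w (d.getD w 0 + 1)
       else d.insert w 1)
      = (if PySem.Set.contains pvSpecial w then d
         else d.insert w (d.getD w 0 + 1)) := by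
    intro d w
    have hmem : (w ∈ ["USERNAME", "URL", "", "EMAIL"]) ↔ (PySem.Set.contains pvSpecial w = true) := by
      rw [PySem.Set.contains_iff]
      simp [pvSpecial, PySem.Set.mem_ofList]
    by_cases hc : PySem.Set.contains pvSpecial w = true
    · rw [if_pos (hmem.mpr hc), if_pos hc]
    · rw [if_neg (fun hm => hc (hmem.mp hm)), if_neg hc]
      by_cases hdc : d.contains w = true
      · rw [if_pos hdc]
      · rw [if_neg hdc, PySem.Dict.getD_of_not_contains d 0 (by simpa using hdc)]
        norm_num
  have h1 : ((PySem.Str.split? tweet " ").getD []).foldl (fun d word =>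
      if word ∈ ["USERNAME", "URL", "", "EMAIL"] then d
      else if d.contains word then d.insert word (d.getD word 0 + 1)
      else d.insert word 1) (PySem.Dict.mk dict)
      = (((PySem.Str.split? tweet " ").getD []).filter (fun w => !(PySem.Set.contains pvSpecial w))).foldl
          (fun d w => d.insert w (d.getD w 0 + 1)) (PySem.Dict.mk dict) := by
    rw [PySem.List.foldl_congr_mem _ _
        (fun (d : PySem.Dict String Int) (w : String) =>
          if PySem.Set.contains pvSpecial w then d else d.insert w (d.getD w 0 + 1)) _
        (fun acc x _ => hstep acc x)]
    exact foldl_skip_if _ _ _ _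
  rw [h1]
  exact core_eq _ _ (by simpa [PySem.Dict.keys] using hpre)
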